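-- pv_equiv track=rewrite | github.com/avishka96/two_person_localization | helpers.py | get_start_frame
-- ===== SOURCE A (Python) =====
-- def get_start_frame(frame, band, fps, person1, person2, dict):
--     is_person1, is_person2 = False, False
--     if ((frame - band*fps) >= 1):
--         start = frame - band*fps
--     else:
--         start = 1
--     for f in range(start, frame):
--         for i in range(len(dict[str(f)])):
--             is_person1 = is_person1 or (int(dict[str(f)][i]["id"]) == person1)
--             is_person2 = is_person2 or (int(dict[str(f)][i]["id"]) == person2)
--             if is_person1 and is_person2:
--                 start = f
--                 break
--         if is_person1 and is_person2:
--             break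
--     return start
-- ===== SOURCE B (Python) =====
-- def get_start_frame(frame, band, fps, person1, person2, dict):
--     start = frame - band * fps if frame - band * fps >= 1 else 1
--
--     def first_frame(person):
--         for f in range(start, frame):
--             for entry in dict[str(f)]:
--                 if int(entry["id"]) == person:
--                     return f
--         return None
--
--     f1 = first_frame(person1)
--     f2 = first_frame(person2)
--     if f1 is not None and f2 is not None:
--         return max(f1, f2)
--     return start
-- ===== Notes on version B (the rewrite author's own statement) =====
-- stated objective: simpler
-- what changed: A accumulates two persistent boolean flags in one joint nested loop with two break levels; B runs two independent first-occurrence searches over the same window (one per person) and combines them with max, returning the default window start if either person is absent.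
import Mathlib
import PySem

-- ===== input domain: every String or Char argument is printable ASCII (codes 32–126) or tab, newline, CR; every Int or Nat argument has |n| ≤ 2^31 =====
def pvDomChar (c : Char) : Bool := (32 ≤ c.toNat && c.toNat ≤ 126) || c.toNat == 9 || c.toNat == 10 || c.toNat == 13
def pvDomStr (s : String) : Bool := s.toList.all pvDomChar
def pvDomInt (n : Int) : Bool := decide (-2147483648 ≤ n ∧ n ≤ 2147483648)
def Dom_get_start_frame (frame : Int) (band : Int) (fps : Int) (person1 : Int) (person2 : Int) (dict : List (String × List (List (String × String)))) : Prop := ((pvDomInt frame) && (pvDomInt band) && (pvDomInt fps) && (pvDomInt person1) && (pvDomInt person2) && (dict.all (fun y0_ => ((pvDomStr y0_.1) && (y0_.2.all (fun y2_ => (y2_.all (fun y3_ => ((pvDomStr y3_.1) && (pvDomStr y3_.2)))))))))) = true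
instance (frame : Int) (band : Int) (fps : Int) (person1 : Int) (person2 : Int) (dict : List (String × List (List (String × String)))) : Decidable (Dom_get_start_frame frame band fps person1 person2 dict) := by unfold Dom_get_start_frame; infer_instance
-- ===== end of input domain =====

-- B replaces A's joint-flag accumulation with two independent first-occurrence scans combined by max (objective: simpler).
-- Both `for f in range(start, frame)` loops are ported as recursion on the remaining iteration count, matching Python's lazy range.

-- ===== PORT A =====
-- int(entry["id"]): first-match "id" lookup, then Python int(); none exactly where Python raises KeyError/ValueError
def pvIdOf (e : List (String × String)) : Option Int :=
  (List.lookup "id" e).bind PySem.Int.ofStr?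

-- A's inner `for i in range(len(dict[str(f)]))` loop with its flag updates and break
def pvInnerA : List (List (String × String)) → Int → Int → Bool → Bool → Option (Bool × Bool)
  | [], _, _, p1, p2 => some (p1, p2)
  | e :: rest, q1, q2, p1, p2 =>
    match pvIdOf e with
    | none => none
    | some v =>
      let p1' := p1 || decide (v = q1)
      let p2' := p2 || decide (v = q2)
      if p1' && p2' then some (p1', p2')
      else pvInnerA rest q1 q2 p1' p2'

-- A's outer `for f in range(start, frame)` loop, `n` iterations left at current frame `f`; `some f` is `start = f; break`
def pvOuterA (d : List (String × List (List (String × String)))) (q1 q2 start : Int) : Nat → Int → Bool → Bool → Option Int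
  | 0, _, _, _ => some start
  | n + 1, f, p1, p2 =>
    match List.lookup (PySem.Int.toStr f) d with
    | none => none
    | some entries =>
      match pvInnerA entries q1 q2 p1 p2 with
      | none => none
      | some (p1', p2') =>
        if p1' && p2' then some f
        else pvOuterA d q1 q2 start n (f + 1) p1' p2'

def get_start_frame (frame : Int) (band : Int) (fps : Int) (person1 : Int) (person2 : Int) (dict : List (String × List (List (String × String)))) : Int :=
  let start := if frame - band * fps ≥ 1 then frame - band * fps else 1
  (pvOuterA dict person1 person2 start (frame - start).toNat start false false).getD 0

-- ===== PORT B =====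
-- does some entry of this frame carry person's id?  (scans until the first match, like Source B's inner for)
def pvFoundInFrame : List (List (String × String)) → Int → Option Bool
  | [], _ => some false
  | e :: rest, q =>
    match pvIdOf e with
    | none => none
    | some v => if v = q then some true else pvFoundInFrame rest q

-- Source B's first_frame over the `n` frames starting at `f`; some none = "return None"
def pvFirstFrame (d : List (String × List (List (String × String)))) (q : Int) : Nat → Int → Option (Option Int)
  | 0, _ => some none
  | n + 1, f =>
    match List.lookup (PySem.Int.toStr f) d with
    | none => none
    | some entries =>
      match pvFoundInFrame entries q with
      | none => none
      | some true => some (some f)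
      | some false => pvFirstFrame d q n (f + 1)

def get_start_frame_alt (frame : Int) (band : Int) (fps : Int) (person1 : Int) (person2 : Int) (dict : List (String × List (List (String × String)))) : Int :=
  let start := if frame - band * fps ≥ 1 then frame - band * fps else 1
  match pvFirstFrame dict person1 (frame - start).toNat start, pvFirstFrame dict person2 (frame - start).toNat start with
  | some (some f1), some (some f2) => max f1 f2
  | some _, some _ => start
  | _, _ => 0

-- ===== PRECONDITION & SPEC =====
-- spec-level copy of int(entry["id"]) (kept separate from the ports' helper)
def pvPreId (e : List (String × String)) : Option Int :=
  (List.lookup "id" e).bind PySem.Int.ofStr?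

-- person p occurs (with a parsable id) somewhere in frame f
def pvPreOcc (d : List (String × List (List (String × String)))) (p : Int) (f : Int) : Bool :=
  match List.lookup (PySem.Int.toStr f) d with
  | some es => es.any (fun e => pvPreId e == some p)
  | none => false

-- person p occurs strictly before position (f, i): in an earlier window frame, or among the first i entries of frame f
def pvPreFoundBy (d : List (String × List (List (String × String)))) (p : Int) (F : List Int) (f : Int) (es : List (List (String × String))) (i : Nat) : Bool :=
  (F.any fun g => decide (g < f) && pvPreOcc d p g) || ((es.take i).any fun e => pvPreId e == some p)

-- Pre_ excludes exactly the inputs on which Python A raises (KeyError for a missing window frame or "id" key, or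
-- ValueError from int()) at a position it actually evaluates, i.e. one not strictly after the point where both
-- persons have been found; B raises on exactly those inputs too.  The check is stated over the first |dict|+1
-- window frames only: beyond them some frame key is necessarily missing, so A can return past that point only by
-- having already found both persons within that prefix.
def Pre_get_start_frame (frame : Int) (band : Int) (fps : Int) (person1 : Int) (person2 : Int) (dict : List (String × List (List (String × String)))) : Prop :=
  (let start := if frame - band * fps ≥ 1 then frame - band * fps else 1
   let L := frame - start
   let M := min L ((dict.length : Int) + 1)
   let F := PySem.List.pyRange start (start + M) 1
   (F.all fun f =>
     (pvPreFoundBy dict person1 F f [] 0 && pvPreFoundBy dict person2 F f [] 0) ||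
     (match List.lookup (PySem.Int.toStr f) dict with
      | none => false
      | some es => (List.range es.length).all fun i =>
          (pvPreFoundBy dict person1 F f es i && pvPreFoundBy dict person2 F f es i) ||
          (pvPreId (es.getD i [])).isSome))
   && (decide (L ≤ M) ||
       ((F.any fun g => pvPreOcc dict person1 g) && (F.any fun g => pvPreOcc dict person2 g)))) = true

instance (frame : Int) (band : Int) (fps : Int) (person1 : Int) (person2 : Int) (dict : List (String × List (List (String × String)))) : Decidable (Pre_get_start_frame frame band fps person1 person2 dict) := by unfold Pre_get_start_frame; infer_instance

def pvWitness_get_start_frame : Int × Int × Int × Int × Int × (List (String × List (List (String × String)))) :=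
  (2, 1, 1, 5, 7, [("1", [[("id", "5")], [("id", "7")]])])

def Spec_get_start_frame (frame : Int) (band : Int) (fps : Int) (person1 : Int) (person2 : Int) (dict : List (String × List (List (String × String)))) (out : Int) : Prop := out = get_start_frame_alt frame band fps person1 person2 dict
instance (frame : Int) (band : Int) (fps : Int) (person1 : Int) (person2 : Int) (dict : List (String × List (List (String × String)))) (out : Int) : Decidable (Spec_get_start_frame frame band fps person1 person2 dict out) := by unfold Spec_get_start_frame; infer_instance

-- ===== CLAIM (what is proved, stated in full; the proofs are below) =====
def Claim_equal_get_start_frame : Prop := ∀ (frame : Int) (band : Int) (fps : Int) (person1 : Int) (person2 : Int) (dict : List (String × List (List (String × String)))), Dom_get_start_frame frame band fps person1 person2 dict → Pre_get_start_frame frame band fps person1 person2 dict → Spec_get_start_frame frame band fps person1 person2 dict (get_start_frame frame band fps person1 person2 dict)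

-- ===== LEMMAS AND PROOFS =====

-- A's inner loop with the person1 flag already set scans exactly like B's search for person2
lemma innerA_true_false (es : List (List (String × String))) (q1 q2 : Int) :
    pvInnerA es q1 q2 true false = (pvFoundInFrame es q2).map (fun b => (true, b)) := by
  induction es with
  | nil => rfl
  | cons e rest ih =>
    cases hv : pvIdOf e with
    | none => simp [pvInnerA, pvFoundInFrame, hv]
    | some v =>
      by_cases h2 : v = q2
      · simp [pvInnerA, pvFoundInFrame, hv, h2]
      · simp [pvInnerA, pvFoundInFrame, hv, h2, ih]

lemma innerA_false_true (es : List (List (String × String))) (q1 q2 : Int) :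
    pvInnerA es q1 q2 false true = (pvFoundInFrame es q1).map (fun b => (b, true)) := by
  induction es with
  | nil => rfl
  | cons e rest ih =>
    cases hv : pvIdOf e with
    | none => simp [pvInnerA, pvFoundInFrame, hv]
    | some v =>
      by_cases h1 : v = q1
      · simp [pvInnerA, pvFoundInFrame, hv, h1]
      · simp [pvInnerA, pvFoundInFrame, hv, h1, ih]

-- A's inner loop from blank flags is the pair of B's two per-frame searches (including where both raise)
lemma innerA_false_false (es : List (List (String × String))) (q1 q2 : Int) :
    pvInnerA es q1 q2 false false =
      match pvFoundInFrame es q1, pvFoundInFrame es q2 with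
      | some a, some b => some (a, b)
      | _, _ => none := by
  induction es with
  | nil => rfl
  | cons e rest ih =>
    cases hv : pvIdOf e with
    | none => simp [pvInnerA, pvFoundInFrame, hv]
    | some v =>
      by_cases h1 : v = q1 <;> by_cases h2 : v = q2
      · have hq : q1 = q2 := by omega
        simp [pvInnerA, pvFoundInFrame, hv, h1, hq]
      · have hq : ¬ q1 = q2 := by omega
        simp only [pvInnerA, pvFoundInFrame, hv, h1, hq, decide_true, decide_false,
          Bool.or_true, Bool.or_false, Bool.and_false,
          if_true, if_false, Bool.false_eq_true, innerA_true_false]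
        cases pvFoundInFrame rest q2 <;> rfl
      · have hq : ¬ q2 = q1 := by omega
        simp only [pvInnerA, pvFoundInFrame, hv, h2, hq, decide_true, decide_false,
          Bool.or_true, Bool.or_false, Bool.and_true,
          if_true, if_false, Bool.false_eq_true, innerA_false_true]
        cases pvFoundInFrame rest q1 <;> rfl
      · simp [pvInnerA, pvFoundInFrame, hv, h1, h2, ih]

-- A's outer loop with the person1 flag set scans exactly like B's first_frame for person2
lemma outerA_true_false (d : List (String × List (List (String × String)))) (q1 q2 start : Int) :
    ∀ (n : Nat) (f : Int),
    pvOuterA d q1 q2 start n f true false = (pvFirstFrame d q2 n f).map (fun o => o.getD start) := by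
  intro n
  induction n with
  | zero => intro f; rfl
  | succ n ih =>
    intro f
    cases hl : List.lookup (PySem.Int.toStr f) d with
    | none => simp [pvOuterA, pvFirstFrame, hl]
    | some es =>
      simp only [pvOuterA, pvFirstFrame, hl, innerA_true_false]
      cases pvFoundInFrame es q2 with
      | none => rfl
      | some b => cases b <;> simp [ih]

lemma outerA_false_true (d : List (String × List (List (String × String)))) (q1 q2 start : Int) :
    ∀ (n : Nat) (f : Int),
    pvOuterA d q1 q2 start n f false true = (pvFirstFrame d q1 n f).map (fun o => o.getD start) := by
  intro n
  induction n with
  | zero => intro f; rfl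
  | succ n ih =>
    intro f
    cases hl : List.lookup (PySem.Int.toStr f) d with
    | none => simp [pvOuterA, pvFirstFrame, hl]
    | some es =>
      simp only [pvOuterA, pvFirstFrame, hl, innerA_false_true]
      cases pvFoundInFrame es q1 with
      | none => rfl
      | some b => cases b <;> simp [ih]

-- a found frame lies at or after the scan's starting frame
lemma firstFrame_lb (d : List (String × List (List (String × String)))) (q : Int) :
    ∀ (n : Nat) (f b : Int), pvFirstFrame d q n f = some (some b) → f ≤ b := by
  intro n
  induction n with
  | zero => intro f b h; simp [pvFirstFrame] at h
  | succ n ih =>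
    intro f b h
    unfold pvFirstFrame at h
    cases hl : List.lookup (PySem.Int.toStr f) d with
    | none => simp [hl] at h
    | some es =>
      simp only [hl] at h
      cases hff : pvFoundInFrame es q with
      | none => simp [hff] at h
      | some v =>
        cases v with
        | true => simp [hff] at h; omega
        | false =>
          simp only [hff] at h
          have := ih (f + 1) b h
          omega

-- the main correspondence: A's joint loop equals the combination of B's two searches,
-- including agreement of the raising (none) cases
lemma outerA_eq_combined (d : List (String × List (List (String × String)))) (q1 q2 start : Int) :
    ∀ (n : Nat) (f : Int),
    pvOuterA d q1 q2 start n f false false =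
      match pvFirstFrame d q1 n f, pvFirstFrame d q2 n f with
      | some (some a), some (some b) => some (max a b)
      | some _, some _ => some start
      | _, _ => none := by
  intro n
  induction n with
  | zero => intro f; rfl
  | succ n ih =>
    intro f
    cases hl : List.lookup (PySem.Int.toStr f) d with
    | none => simp [pvOuterA, pvFirstFrame, hl]
    | some es =>
      simp only [pvOuterA, pvFirstFrame, hl, innerA_false_false]
      cases h1 : pvFoundInFrame es q1 with
      | none => rfl
      | some a1 =>
        cases h2 : pvFoundInFrame es q2 with
        | none =>
          cases a1
          · cases hr : pvFirstFrame d q1 n (f + 1) with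
            | none => rfl
            | some o => cases o <;> rfl
          · rfl
        | some a2 =>
          cases a1 <;> cases a2
          · -- neither found in this frame: recurse
            simpa using ih (f + 1)
          · -- only q2 found here: A continues as search for q1
            simp only [Bool.false_and, Bool.false_eq_true, if_false, outerA_false_true]
            cases hr : pvFirstFrame d q1 n (f + 1) with
            | none => rfl
            | some o =>
              cases o with
              | none => rfl
              | some a =>
                have : f < a := by have := firstFrame_lb d q1 n (f + 1) a hr; omega
                simp [max_eq_left (le_of_lt this)]
          · -- only q1 found here: A continues as search for q2
            simp only [Bool.and_false, Bool.false_eq_true, if_false, outerA_true_false]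
            cases hr : pvFirstFrame d q2 n (f + 1) with
            | none => rfl
            | some o =>
              cases o with
              | none => rfl
              | some b =>
                have : f < b := by have := firstFrame_lb d q2 n (f + 1) b hr; omega
                simp [max_eq_right (le_of_lt this)]
          · -- both found in this frame
            simp

-- ===== VERDICT (by name: the statement is the Claim_ definition above) =====
theorem get_start_frame_spec : Claim_equal_get_start_frame := by
  intro frame band fps q1 q2 d _ _
  unfold Spec_get_start_frame get_start_frame get_start_frame_alt
  set start := if frame - band * fps ≥ 1 then frame - band * fps else 1 with hstart
  show (pvOuterA d q1 q2 start (frame - start).toNat start false false).getD 0 =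
    (match pvFirstFrame d q1 (frame - start).toNat start, pvFirstFrame d q2 (frame - start).toNat start with
     | some (some f1), some (some f2) => max f1 f2
     | some _, some _ => start
     | _, _ => 0)
  rw [outerA_eq_combined d q1 q2 start (frame - start).toNat start]
  cases h1 : pvFirstFrame d q1 (frame - start).toNat start with
  | none => rfl
  | some o1 =>
    cases h2 : pvFirstFrame d q2 (frame - start).toNat start with
    | none => cases o1 <;> rfl
    | some o2 => cases o1 <;> cases o2 <;> rfl
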